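-- pv_equiv track=rewrite | github.com/eloqlo/Code_Interview | SAMSUNG_BJO/17140_3.py | get_new_arr
-- ===== SOURCE A (Python) =====
-- def get_new_arr(arr):
--     R = len(arr)
--     C = len(arr[0])
--     if R>=C:
--         # row-wise
--         new_arr = []
--         max_line_len = 0
--         for line in arr:
--             new_line = get_new_line(line)
--             max_line_len = max(max_line_len,len(new_line))
--             new_arr.append(new_line)
--         for idx in range(len(new_arr)):
--             new_arr[idx] = new_arr[idx] + [0]*(max_line_len-len(new_arr[idx]))
--     else:
--         # col-wise
--         new_dig_arr = []
--         max_line_len = 0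
--         for col in zip(*arr):
--             new_col = get_new_line(list(col))
--             max_line_len = max(max_line_len, len(new_col))
--             new_dig_arr.append(new_col + [0]*(100-len(new_col)))
--         new_arr = []
--         for iteration, new_row in enumerate(zip(*new_dig_arr)):
--             if iteration==max_line_len:
--                 break
--             new_arr.append(list(new_row))
--     return new_arr
--
-- def get_new_line(line):
--     counter = [0]*101
--     for num in line:    # O(100)
--         counter[num] += 1
--     sorting_line=[]
--     for num,freq in enumerate(counter):     # O(100)
--         if num==0 or freq==0:
--             continue
--         if len(sorting_line)==0:
--             sorting_line.append((freq,num))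
--             continue
--         sorting_line = binary_search(sorting_line, freq, num)   # less than 8
--     sorted_line = []
--     for idx, (freq, num) in enumerate(sorting_line):   # O(100)
--         if idx == 50:
--             break
--         sorted_line.append(num)
--         sorted_line.append(freq)
--     return sorted_line[:100]
--
-- def binary_search(sorting_line, freq, num):
--     st=0
--     ed=len(sorting_line)-1
--     pos=None
--     for _ in range(len(sorting_line)+2):
--         if st>ed:
--             pos=max(st,ed)
--             break
--         mid = (st+ed)//2
--         if sorting_line[mid][0]<=freq:
--             st = mid+1
--         elif sorting_line[mid][0]>freq:
--             ed = mid-1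
--     if pos==0:
--         return [(freq,num)] + sorting_line
--     elif pos==len(sorting_line):
--         return sorting_line + [(freq,num)]
--     else:
--         return sorting_line[:pos] + [(freq,num)] + sorting_line[pos:]
-- ===== SOURCE B (Python) =====
-- def get_new_arr(arr):
--     if len(arr) >= len(arr[0]):
--         rows = [get_new_line(line) for line in arr]
--         m = max(len(r) for r in rows)
--         return [r + [0] * (m - len(r)) for r in rows]
--     cols = [get_new_line(list(c)) for c in zip(*arr)]
--     m = max((len(c) for c in cols), default=0)
--     padded = [c + [0] * (100 - len(c)) for c in cols]
--     return [list(row) for row in list(zip(*padded))[:m]]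
--
-- def get_new_line(line):
--     counter = [0] * 101
--     for num in line:    # kept verbatim: IndexError / negative wrap as in the original
--         counter[num] += 1
--     pairs = sorted((freq, num) for num, freq in enumerate(counter) if num != 0 and freq != 0)
--     out = []
--     for freq, num in pairs[:50]:
--         out.append(num)
--         out.append(freq)
--     return out
-- ===== Notes on version B (the rewrite author's own statement) =====
-- stated objective: simpler
-- what changed: the binary_search helper and the incremental insertion loop are deleted: nonzero (freq,num) pairs are collected once and ordered by a single library sorted() call, and the outer padding/transpose loops become comprehensions
import Mathlib
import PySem

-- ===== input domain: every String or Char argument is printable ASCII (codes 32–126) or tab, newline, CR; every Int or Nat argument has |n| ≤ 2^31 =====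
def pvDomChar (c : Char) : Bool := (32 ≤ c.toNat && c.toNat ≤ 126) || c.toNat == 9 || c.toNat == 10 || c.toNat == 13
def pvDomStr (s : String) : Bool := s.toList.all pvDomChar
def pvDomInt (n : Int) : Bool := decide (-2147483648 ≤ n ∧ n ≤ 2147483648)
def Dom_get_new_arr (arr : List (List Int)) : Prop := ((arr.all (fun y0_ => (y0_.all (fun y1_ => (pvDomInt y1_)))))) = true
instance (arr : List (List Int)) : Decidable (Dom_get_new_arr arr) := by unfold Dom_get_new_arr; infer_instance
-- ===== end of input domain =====

-- B replaces A's hand-written binary-search insertion with one library sort of the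
-- (freq, num) pairs and comprehension-style padding/transposition: simpler, same results.

-- ===== PORT A =====

-- zip(*rows): Python's zip over the unpacked rows (stops at the shortest row);
-- builtin helper shared by both ports.  Fuel = first row length + 1 suffices.
def pyZipGo : Nat → List (List Int) → List (List Int)
  | 0, _ => []
  | n + 1, rows =>
      if rows.any (fun l => l.isEmpty) then []
      else rows.map (fun l => l.headI) :: pyZipGo n (rows.map (fun l => l.tail))

def pyZipStar (rows : List (List Int)) : List (List Int) :=
  match rows with
  | [] => []
  | r :: rs => pyZipGo (r.length + 1) (r :: rs)

-- the 'for _ in range(len(sorting_line)+2)' search loop of A's binary_search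
-- (indexing sorting_line[mid] stays in range: st, ed keep 0 ≤ st ≤ mid ≤ ed ≤ len-1 when st ≤ ed)
def bsLoop (sl : List (Int × Int)) (freq : Int) : Nat → Int → Int → Option Int
  | 0, _, _ => none
  | fuel + 1, st, ed =>
      if st > ed then some (max st ed)
      else
        let mid := PySem.Int.floordiv (st + ed) 2
        if (PySem.List.pyGetD sl mid (0, 0)).1 ≤ freq then bsLoop sl freq fuel (mid + 1) ed
        else bsLoop sl freq fuel st (mid - 1)

def binary_search (sorting_line : List (Int × Int)) (freq num : Int) : List (Int × Int) :=
  let pos := bsLoop sorting_line freq (sorting_line.length + 2) 0 ((sorting_line.length : Int) - 1)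
  if pos = some 0 then (freq, num) :: sorting_line
  else if pos = some (sorting_line.length : Int) then sorting_line ++ [(freq, num)]
  else PySem.List.slice sorting_line none pos ++ (freq, num) :: PySem.List.slice sorting_line pos none

-- 'for idx, x in enumerate(...): if idx == stop: break; acc = f(acc, x)' (A's two break loops)
def breakFold {α β : Type} (stop : Int) (f : β → α → β) : List (Int × α) → β → β
  | [], acc => acc
  | (idx, x) :: rest, acc => if idx = stop then acc else breakFold stop f rest (f acc x)

def get_new_line (line : List Int) : List Int :=
  let counter : List Int := List.replicate 101 0
  let counter := line.foldl (fun c num => PySem.List.pySetD c num (PySem.List.pyGetD c num 0 + 1)) counter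
  let sorting_line := (PySem.List.enumerate counter).foldl
      (fun sl p =>
        if p.1 = 0 ∨ p.2 = 0 then sl
        else if sl.length = 0 then sl ++ [(p.2, p.1)]
        else binary_search sl p.2 p.1) []
  let sorted_line := breakFold 50 (fun out (p : Int × Int) => out ++ [p.2, p.1])
      (PySem.List.enumerate sorting_line) []
  PySem.List.slice sorted_line none (some 100)

def get_new_arr (arr : List (List Int)) : List (List Int) :=
  if (PySem.List.pyGetD arr 0 []).length ≤ arr.length then   -- R >= C (C = len(arr[0]))
    let acc := arr.foldl (fun (acc : List (List Int) × Int) line =>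
        let new_line := get_new_line line
        (acc.1 ++ [new_line], max acc.2 (new_line.length : Int))) ([], 0)
    acc.1.map (fun l => l ++ List.replicate (acc.2 - (l.length : Int)).toNat 0)
  else
    let acc := (pyZipStar arr).foldl (fun (acc : List (List Int) × Int) col =>
        let new_col := get_new_line col
        (acc.1 ++ [new_col ++ List.replicate (100 - new_col.length) 0],
         max acc.2 (new_col.length : Int))) ([], 0)
    breakFold acc.2 (fun (na : List (List Int)) row => na ++ [row])
      (PySem.List.enumerate (pyZipStar acc.1)) []

-- ===== PORT B =====

def get_new_line_alt (line : List Int) : List Int :=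
  let counter := line.foldl (fun c num => PySem.List.pySetD c num (PySem.List.pyGetD c num 0 + 1))
      (List.replicate 101 0)
  let pairs := PySem.List.sorted2
      (((PySem.List.enumerate counter).filter (fun p => p.1 != 0 && p.2 != 0)).map (fun p => (p.2, p.1)))
      (fun p => p.1) (fun p => p.2)
  (PySem.List.slice pairs none (some 50)).foldl (fun out p => out ++ [p.2, p.1]) []

def get_new_arr_alt (arr : List (List Int)) : List (List Int) :=
  if (PySem.List.pyGetD arr 0 []).length ≤ arr.length then
    let rows := arr.map get_new_line_alt
    -- max(len(r) for r in rows): rows is nonempty under Pre_ (arr ≠ []), so the 0 default never shows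
    let m := PySem.List.maxD (rows.map (fun r => (r.length : Int))) (fun x => x) 0
    rows.map (fun r => r ++ List.replicate (m - (r.length : Int)).toNat 0)
  else
    let cols := (pyZipStar arr).map get_new_line_alt
    let m := PySem.List.maxD (cols.map (fun c => (c.length : Int))) (fun x => x) 0
    let padded := cols.map (fun c => c ++ List.replicate (100 - c.length) 0)
    PySem.List.slice (pyZipStar padded) none (some m)

-- ===== PRECONDITION & SPEC =====
-- Pre_ excludes exactly the inputs where the Python A raises: the empty list (arr[0] →
-- IndexError) and inputs whose counted cells fall outside [-101, 100] (counter[num] →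
-- IndexError; in the column-wise branch only the cells zip(*arr) reaches are counted).
def Pre_get_new_arr (arr : List (List Int)) : Prop :=
  arr ≠ [] ∧
  ((PySem.List.pyGetD arr 0 []).length ≤ arr.length →
     ∀ r ∈ arr, ∀ x ∈ r, -101 ≤ x ∧ x ≤ 100) ∧
  (arr.length < (PySem.List.pyGetD arr 0 []).length →
     ∀ r ∈ arr, ∀ x ∈ r.take ((arr.map List.length).min?.getD 0), -101 ≤ x ∧ x ≤ 100)
instance (arr : List (List Int)) : Decidable (Pre_get_new_arr arr) := by
  unfold Pre_get_new_arr; infer_instance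

def pvWitness_get_new_arr : List (List Int) := [[1, 2], [2, 1]]

def Spec_get_new_arr (arr : List (List Int)) (out : List (List Int)) : Prop := out = get_new_arr_alt arr
instance (arr : List (List Int)) (out : List (List Int)) : Decidable (Spec_get_new_arr arr out) := by unfold Spec_get_new_arr; infer_instance

-- ===== CLAIM (what is proved, stated in full; the proofs are below) =====
def Claim_equal_get_new_arr : Prop := ∀ (arr : List (List Int)), Dom_get_new_arr arr → Pre_get_new_arr arr → Spec_get_new_arr arr (get_new_arr arr)

-- ===== LEMMAS AND PROOFS =====

-- strict lexicographic order on (freq, num) pairs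
def lexlt (p q : Int × Int) : Prop := p.1 < q.1 ∨ (p.1 = q.1 ∧ p.2 < q.2)

-- the comparison sorted2 uses on (freq, num) with keys fst, snd
def before2 (a b : Int × Int) : Bool :=
  decide (a.1 < b.1) || (!decide (b.1 < a.1) && decide (a.2 < b.2))

-- position at which a pair of frequency f lands: number of entries with freq ≤ f
def kcount (sl : List (Int × Int)) (f : Int) : Nat := sl.countP (fun p => decide (p.1 ≤ f))

lemma sorted2_unfold (xs : List (Int × Int)) :
    PySem.List.sorted2 xs (fun p => p.1) (fun p => p.2) false
      = xs.foldl (fun acc x => PySem.List.insertBy before2 x acc) [] := rfl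

lemma countP_bracket (f : Int) :
    ∀ sl : List (Int × Int), sl.Pairwise (fun a b => a.1 ≤ b.1) →
      (∀ y ∈ sl.take (kcount sl f), y.1 ≤ f) ∧ (∀ y ∈ sl.drop (kcount sl f), f < y.1) := by
  intro sl
  induction sl with
  | nil => intro _; simp [kcount]
  | cons y ys ih =>
    intro h
    rw [List.pairwise_cons] at h
    obtain ⟨hy, hys⟩ := h
    obtain ⟨h1, h2⟩ := ih hys
    by_cases hf : y.1 ≤ f
    · have hk : kcount (y :: ys) f = kcount ys f + 1 := by
        simp [kcount, hf]
      rw [hk]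
      constructor
      · intro z hz
        rw [List.take_succ_cons] at hz
        rcases List.mem_cons.mp hz with hz | hz
        · rw [hz]; exact hf
        · exact h1 z hz
      · intro z hz
        rw [List.drop_succ_cons] at hz
        exact h2 z hz
    · have hz0 : List.countP (fun p => decide (p.1 ≤ f)) ys = 0 := by
        rw [List.countP_eq_zero]
        intro p hp
        have := hy p hp
        simp only [decide_eq_true_eq]
        omega
      have h0 : kcount (y :: ys) f = 0 := by
        simp [kcount, hf, hz0]
      rw [h0]
      constructor
      · intro z hz; simp at hz
      · intro z hz
        rw [List.drop_zero] at hz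
        rcases List.mem_cons.mp hz with hz | hz
        · rw [hz]; omega
        · have := hy z hz; omega

lemma bsLoop_eq (sl : List (Int × Int)) (f : Int)
    (hs : sl.Pairwise (fun a b => a.1 ≤ b.1)) :
    ∀ (fuel : Nat) (st ed : Int), 0 ≤ st → ed ≤ (sl.length : Int) - 1 → st ≤ ed + 1 →
      st ≤ (kcount sl f : Int) → (kcount sl f : Int) ≤ ed + 1 → ed + 1 - st < (fuel : Int) →
      bsLoop sl f fuel st ed = some ((kcount sl f : Int)) := by
  intro fuel
  induction fuel with
  | zero =>
    intro st ed h0 h1 h2 h3 h4 h5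
    exfalso; omega
  | succ fuel ih =>
    intro st ed h0 h1 h2 h3 h4 h5
    by_cases hst : st > ed
    · simp only [bsLoop, if_pos hst]
      congr 1
      omega
    · simp only [bsLoop, if_neg hst]
      have hmid := PySem.Int.floordiv_two_mid_bounds (show st ≤ ed by omega)
      set mid := PySem.Int.floordiv (st + ed) 2 with hmiddef
      have hr0 : 0 ≤ mid := by omega
      have hr1 : mid < (sl.length : Int) := by omega
      rw [PySem.List.pyGetD_eq_getElem sl (0, 0) hr0 hr1]
      obtain ⟨htake, hdrop⟩ := countP_bracket f sl hs
      by_cases hcmp : (sl[mid.toNat]'(by omega)).1 ≤ f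
      · have hklow : mid + 1 ≤ (kcount sl f : Int) := by
          by_contra hcon
          push Not at hcon
          have hkn : kcount sl f ≤ mid.toNat := by omega
          have hmem : sl[mid.toNat]'(by omega) ∈ sl.drop (kcount sl f) := by
            have h' : (sl.drop (kcount sl f))[mid.toNat - kcount sl f]'(by
                rw [List.length_drop]; omega) = sl[mid.toNat]'(by omega) := by
              rw [List.getElem_drop]
              congr 1
              omega
            rw [← h']
            exact List.getElem_mem _
          have := hdrop _ hmem
          omega
        rw [if_pos hcmp]
        exact ih (mid + 1) ed (by omega) h1 (by omega) hklow h4 (by omega)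
      · have hcmp' := not_le.mp hcmp
        have hkhigh : (kcount sl f : Int) ≤ mid := by
          by_contra hcon
          push Not at hcon
          have hkn : mid.toNat < kcount sl f := by omega
          have hklen : kcount sl f ≤ sl.length := List.countP_le_length ..
          have hmem : sl[mid.toNat]'(by omega) ∈ sl.take (kcount sl f) := by
            have h' : (sl.take (kcount sl f))[mid.toNat]'(by
                rw [List.length_take]; omega) = sl[mid.toNat]'(by omega) :=
              List.getElem_take ..
            rw [← h']
            exact List.getElem_mem _
          have := htake _ hmem
          omega
        rw [if_neg hcmp]
        exact ih st (mid - 1) h0 (by omega) (by omega) h3 (by omega) (by omega)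

lemma binary_search_eq (sl : List (Int × Int)) (f n : Int)
    (hs : sl.Pairwise (fun a b => a.1 ≤ b.1)) :
    binary_search sl f n = sl.take (kcount sl f) ++ (f, n) :: sl.drop (kcount sl f) := by
  have hklen : kcount sl f ≤ sl.length := List.countP_le_length ..
  have hk := bsLoop_eq sl f hs (sl.length + 2) 0 ((sl.length : Int) - 1)
    (by omega) (by omega) (by omega) (by omega) (by omega) (by omega)
  simp only [binary_search, hk]
  by_cases h0 : kcount sl f = 0
  · simp [h0]
  · by_cases hlen : kcount sl f = sl.length
    · have hne0 : ¬ (some ((kcount sl f : Int)) = some (0 : Int)) := by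
        simp only [Option.some.injEq]
        omega
      rw [if_neg hne0, if_pos (by rw [hlen])]
      rw [hlen, List.take_length, List.drop_length]
    · have hne0 : ¬ (some ((kcount sl f : Int)) = some (0 : Int)) := by
        simp only [Option.some.injEq]
        omega
      have hnel : ¬ (some ((kcount sl f : Int)) = some ((sl.length : Int))) := by
        simp only [Option.some.injEq]
        omega
      rw [if_neg hne0, if_neg hnel]
      rw [PySem.List.slice_to sl (by omega), PySem.List.slice_from sl (by omega)]
      simp

lemma insertBy_eq (sl : List (Int × Int)) (f n : Int)
    (hs : sl.Pairwise (fun a b => a.1 ≤ b.1)) (hn : ∀ y ∈ sl, y.2 < n) :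
    PySem.List.insertBy before2 (f, n) sl
      = sl.take (kcount sl f) ++ (f, n) :: sl.drop (kcount sl f) := by
  induction sl with
  | nil => simp [PySem.List.insertBy, kcount]
  | cons y ys ih =>
    rw [List.pairwise_cons] at hs
    obtain ⟨hy, hys⟩ := hs
    have hny : y.2 < n := hn y (List.mem_cons_self ..)
    have hb : before2 (f, n) y = decide (f < y.1) := by
      simp only [before2]
      have : decide ((f, n).2 < y.2) = false := by simpa using (by omega : ¬ n < y.2)
      simp [this]
    by_cases hf : f < y.1
    · have hz0 : List.countP (fun p => decide (p.1 ≤ f)) ys = 0 := by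
        rw [List.countP_eq_zero]
        intro p hp
        have := hy p hp
        simp only [decide_eq_true_eq]
        omega
      have h0 : kcount (y :: ys) f = 0 := by
        have hd : decide (y.1 ≤ f) = false := by simp only [decide_eq_false_iff_not]; omega
        simp [kcount, hd, hz0]
      rw [h0]
      simp only [PySem.List.insertBy, hb]
      simp [hf]
    · have hk : kcount (y :: ys) f = kcount ys f + 1 := by
        simp [kcount, (by omega : y.1 ≤ f)]
      rw [hk]
      simp only [PySem.List.insertBy, hb]
      have : decide (f < y.1) = false := by simpa using hf
      simp only [this, if_false]
      rw [List.take_succ_cons, List.drop_succ_cons]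
      have ih' := ih hys (fun z hz => hn z (List.mem_cons_of_mem y hz))
      simp only [PySem.List.insertBy] at ih'
      rw [ih']
      simp

lemma pairwise_insert (sl : List (Int × Int)) (f n : Int)
    (h : sl.Pairwise lexlt) (hn : ∀ y ∈ sl, y.2 < n) :
    (sl.take (kcount sl f) ++ (f, n) :: sl.drop (kcount sl f)).Pairwise lexlt := by
  have hs : sl.Pairwise (fun a b => a.1 ≤ b.1) := by
    refine h.imp ?_
    intro a b hab
    rcases hab with h1 | ⟨h1, _⟩ <;> omega
  obtain ⟨htake, hdrop⟩ := countP_bracket f sl hs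
  have hsplit : sl.take (kcount sl f) ++ sl.drop (kcount sl f) = sl := List.take_append_drop _ _
  have h' : (sl.take (kcount sl f) ++ sl.drop (kcount sl f)).Pairwise lexlt := by
    rw [hsplit]; exact h
  rw [List.pairwise_append] at h'
  obtain ⟨hp1, hp2, hp12⟩ := h'
  rw [List.pairwise_append]
  refine ⟨hp1, ?_, ?_⟩
  · rw [List.pairwise_cons]
    refine ⟨?_, hp2⟩
    intro y hy
    exact Or.inl (hdrop y hy)
  · intro a ha b hb
    rcases List.mem_cons.mp hb with hb | hb
    · subst hb
      have h1 := htake a ha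
      have h2 := hn a (List.mem_of_mem_take ha)
      rcases lt_or_eq_of_le h1 with h3 | h3
      · exact Or.inl h3
      · exact Or.inr ⟨h3, h2⟩
    · exact hp12 a ha b hb

lemma fold_eq : ∀ (es : List (Int × Int)) (acc : List (Int × Int)),
    acc.Pairwise lexlt → (∀ p ∈ acc, ∀ q ∈ es, p.2 < q.1) →
    es.Pairwise (fun a b => a.1 < b.1) →
    es.foldl (fun sl p =>
        if p.1 = 0 ∨ p.2 = 0 then sl
        else if sl.length = 0 then sl ++ [(p.2, p.1)]
        else binary_search sl p.2 p.1) acc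
      = ((es.filter (fun p => p.1 != 0 && p.2 != 0)).map (fun p => (p.2, p.1))).foldl
          (fun a x => PySem.List.insertBy before2 x a) acc := by
  intro es
  induction es with
  | nil => intro acc _ _ _; rfl
  | cons e t ih =>
    intro acc hpa hnum hpe
    rw [List.pairwise_cons] at hpe
    obtain ⟨he, hpt⟩ := hpe
    simp only [List.foldl_cons]
    by_cases hskip : e.1 = 0 ∨ e.2 = 0
    · have hfe : (e.1 != 0 && e.2 != 0) = false := by
        rcases hskip with h | h <;> simp [h]
      rw [List.filter_cons_of_neg (by simp [hfe])]
      rw [if_pos hskip]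
      exact ih acc hpa (fun p hp q hq => hnum p hp q (List.mem_cons_of_mem e hq)) hpt
    · have hfe : (e.1 != 0 && e.2 != 0) = true := by
        push Not at hskip
        simp [hskip.1, hskip.2]
      rw [List.filter_cons_of_pos (by simp [hfe]), List.map_cons, List.foldl_cons]
      have hs : acc.Pairwise (fun a b => a.1 ≤ b.1) := by
        refine hpa.imp ?_
        intro a b hab
        rcases hab with h1 | ⟨h1, _⟩ <;> omega
      have hnacc : ∀ y ∈ acc, y.2 < e.1 := fun y hy => hnum y hy e (List.mem_cons_self ..)
      have hins : PySem.List.insertBy before2 (e.2, e.1) acc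
          = acc.take (kcount acc e.2) ++ (e.2, e.1) :: acc.drop (kcount acc e.2) :=
        insertBy_eq acc e.2 e.1 hs hnacc
      have hstep : (if acc.length = 0 then acc ++ [(e.2, e.1)] else binary_search acc e.2 e.1)
          = PySem.List.insertBy before2 (e.2, e.1) acc := by
        by_cases hlen : acc.length = 0
        · have hacc : acc = [] := List.length_eq_zero_iff.mp hlen
        
          subst hacc
          simp [PySem.List.insertBy]
        · rw [if_neg hlen, binary_search_eq acc e.2 e.1 hs, hins]
      rw [if_neg hskip, hstep]
      apply ih
      · rw [hins]
        exact pairwise_insert acc e.2 e.1 hpa hnacc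
      · intro p hp q hq
        rw [hins] at hp
        have hp' : p = (e.2, e.1) ∨ p ∈ acc := by
          rcases List.mem_append.mp hp with h1 | h1
          · exact Or.inr (List.mem_of_mem_take h1)
          · rcases List.mem_cons.mp h1 with h1 | h1
            · exact Or.inl h1
            · exact Or.inr (List.mem_of_mem_drop h1)
        rcases hp' with h1 | h1
        · rw [h1]
          exact he q hq
        · exact hnum p h1 q (List.mem_cons_of_mem e hq)
      · exact hpt

lemma enumerate_pairwise_fst (xs : List Int) (s : Int) :
    (PySem.List.enumerate xs s).Pairwise (fun a b => a.1 < b.1) := by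
  have h := PySem.List.pairwise_lt_pyRange_one s (s + (xs.length : Int))
  rw [← PySem.List.map_fst_enumerate] at h
  exact List.pairwise_map.mp h

lemma breakFold_eq {α β : Type} (stop : Int) (f : β → α → β) :
    ∀ (sl : List α) (s : Int) (acc : β), s ≤ stop →
      breakFold stop f (PySem.List.enumerate sl s) acc = (sl.take (stop - s).toNat).foldl f acc := by
  intro sl
  induction sl with
  | nil => intro s acc hs; simp [PySem.List.enumerate, breakFold]
  | cons x t ih =>
    intro s acc hs
    rw [PySem.List.enumerate_cons]
    by_cases h : s = stop
    · have h0 : (stop - s).toNat = 0 := by omega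
      rw [h0]
      simp [breakFold, h]
    · have hlt : s + 1 ≤ stop := by omega
      have ht : (stop - s).toNat = (stop - (s + 1)).toNat + 1 := by omega
      simp only [breakFold, h, if_false]
      rw [ht, List.take_succ_cons, List.foldl_cons]
      exact ih (s + 1) (f acc x) hlt

lemma length_foldl_two (l : List (Int × Int)) :
    ∀ acc : List Int, (l.foldl (fun out p => out ++ [p.2, p.1]) acc).length
      = acc.length + 2 * l.length := by
  induction l with
  | nil => intro acc; simp
  | cons p t ih =>
    intro acc
    rw [List.foldl_cons, ih]
    simp [List.length_append]
    omega

lemma foldl_max_le (l : List Int) : ∀ m : Int, m ≤ l.foldl max m := by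
  induction l with
  | nil => intro m; simp
  | cons x t ih =>
    intro m
    rw [List.foldl_cons]
    exact le_trans (le_max_left m x) (ih (max m x))

lemma foldl_max_key_le {α : Type} (h : α → Int) (l : List α) :
    ∀ m : Int, m ≤ l.foldl (fun mm x => max mm (h x)) m := by
  induction l with
  | nil => intro m; simp
  | cons x t ih =>
    intro m
    rw [List.foldl_cons]
    exact le_trans (le_max_left m (h x)) (ih (max m (h x)))

lemma maxD_id (l : List Int) (h : ∀ x ∈ l, 0 ≤ x) :
    PySem.List.maxD l (fun x => x) 0 = l.foldl max 0 := by
  have aux : ∀ (t : List Int) (m : Int),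
      PySem.List.max? (m :: t) (fun x => x) = some (t.foldl max m) := by
    intro t
    induction t with
    | nil => intro m; rfl
    | cons x t ih =>
      intro m
      have h1 := ih (max m x)
      simp only [PySem.List.max?, List.foldl_cons] at h1 ⊢
      rcases lt_or_ge m x with hx | hx
      · have h2 : max m x = x := max_eq_right (le_of_lt hx)
        rw [h2] at h1 ⊢
        simpa [hx] using h1
      · have h2 : max m x = m := max_eq_left hx
        rw [h2] at h1 ⊢
        simpa [not_lt.mpr hx] using h1
  cases l with
  | nil => rfl
  | cons x t =>
    have hx : (0 : Int) ≤ x := h x (List.mem_cons_self ..)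
    simp only [PySem.List.maxD, aux t x, Option.getD_some, List.foldl_cons]
    rw [max_eq_right hx]

lemma foldl_pair {α : Type} (g : α → List Int) (h : α → Int) :
    ∀ (xs : List α) (acc : List (List Int)) (m : Int),
      xs.foldl (fun a l => (a.1 ++ [g l], max a.2 (h l))) (acc, m)
        = (acc ++ xs.map g, xs.foldl (fun mm l => max mm (h l)) m) := by
  intro xs
  induction xs with
  | nil => intro acc m; simp
  | cons x t ih =>
    intro acc m
    rw [List.foldl_cons, List.foldl_cons, ih]
    simp

lemma line_eq (line : List Int) : get_new_line line = get_new_line_alt line := by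
  simp only [get_new_line, get_new_line_alt]
  rw [sorted2_unfold]
  rw [fold_eq (PySem.List.enumerate (line.foldl
        (fun c num => PySem.List.pySetD c num (PySem.List.pyGetD c num 0 + 1))
        (List.replicate 101 0))) []
      List.Pairwise.nil (by intro p hp; cases hp) (enumerate_pairwise_fst _ 0)]
  rw [breakFold_eq 50 _ _ 0 [] (by omega)]
  rw [PySem.List.slice_to _ (by omega)]
  rw [PySem.List.slice_to _ (by omega)]
  have h50 : ((50 : Int) - 0).toNat = (50 : Int).toNat := by norm_num
  rw [h50]
  apply List.take_of_length_le
  rw [length_foldl_two]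
  set P := List.foldl (fun a x => PySem.List.insertBy before2 x a) []
      (List.map (fun p => (p.2, p.1))
        (List.filter (fun p => p.1 != 0 && p.2 != 0)
          (PySem.List.enumerate
            (List.foldl (fun c num => PySem.List.pySetD c num (PySem.List.pyGetD c num 0 + 1))
              (List.replicate 101 0) line)))) with hP
  have h1 : (List.take ((50 : Int).toNat) P).length ≤ (50 : Int).toNat := List.length_take_le ..
  have h2 : (50 : Int).toNat = 50 := rfl
  have h3 : (100 : Int).toNat = 100 := rfl
  simp only [List.length_nil]
  omega

-- ===== VERDICT (by name: the statement is the Claim_ definition above) =====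
theorem get_new_arr_spec : Claim_equal_get_new_arr := by
  intro arr _ _
  unfold Spec_get_new_arr
  show get_new_arr arr = get_new_arr_alt arr
  simp only [get_new_arr, get_new_arr_alt]
  by_cases hbr : (PySem.List.pyGetD arr 0 []).length ≤ arr.length
  · rw [if_pos hbr, if_pos hbr]
    rw [foldl_pair get_new_line (fun l => ((get_new_line l).length : Int)) arr [] 0]
    simp only [List.nil_append]
    rw [maxD_id _ (by intro x hx; simp only [List.mem_map] at hx; obtain ⟨r, _, hr⟩ := hx; omega)]
    simp [List.map_map, List.foldl_map, Function.comp_def, line_eq]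
  · rw [if_neg hbr, if_neg hbr]
    rw [foldl_pair
        (fun col => get_new_line col ++ List.replicate (100 - (get_new_line col).length) 0)
        (fun col => ((get_new_line col).length : Int)) (pyZipStar arr) [] 0]
    simp only [List.nil_append]
    rw [breakFold_eq _ _ _ 0 []
        (foldl_max_key_le (fun col => ((get_new_line col).length : Int)) (pyZipStar arr) 0)]
    rw [PySem.List.foldl_append_singleton]
    simp only [List.nil_append, sub_zero]
    rw [maxD_id _ (by intro x hx; simp only [List.mem_map] at hx; obtain ⟨r, _, hr⟩ := hx; omega)]
    rw [PySem.List.slice_to _ (foldl_max_le _ 0)]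
    simp [List.map_map, List.foldl_map, Function.comp_def, line_eq]
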